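-- pv_equiv track=rewrite | github.com/DeadLoss1801/Notes | DSA/Dp/7_dp.py | solve
-- ===== SOURCE A (Python) =====
-- def solve(n, arr):
--     dp = [[0 for j in range(4)] for i in range(n)]
--
--     dp[0][0] = max(arr[0][1], arr[0][2])
--     dp[0][1] = max(arr[0][0], arr[0][2])
--     dp[0][2] = max(arr[0][0], arr[0][1])
--     dp[0][3] = max(arr[0][1], max(arr[0][0], arr[0][2]))
--
--     for day in range(1, n):
--         for last in range(4):
--             dp[day][last] = 0
--             for task in range(3):
--                 if task != last:
--                     activity = arr[day][task] + dp[day-1][task]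
--                     dp[day][last] = max(dp[day][last], activity)
--
--     return dp[n-1][3]
-- ===== SOURCE B (Python) =====
-- def _mul(p, q):
--     # max-plus (tropical) 5x5 matrix product; None = -infinity (no path)
--     out = []
--     for i in range(5):
--         row = []
--         for j in range(5):
--             best = None
--             for k in range(5):
--                 x = p[i][k]
--                 y = q[k][j]
--                 if x is not None and y is not None:
--                     s = x + y
--                     if best is None or s > best:
--                         best = s
--             row.append(best)
--         out.append(row)
--     return out
--
-- def _mat(r):
--     # one day's transition matrix over states (last task 0,1,2, "any" 3, floor Z=4)
--     return [[None, r[1], r[2], None, 0],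
--             [r[0], None, r[2], None, 0],
--             [r[0], r[1], None, None, 0],
--             [r[0], r[1], r[2], None, 0],
--             [None, None, None, None, 0]]
--
-- def _prod(arr, lo, hi):
--     # max-plus product of the day matrices for days lo..hi-1, combined divide and conquer
--     if hi - lo == 1:
--         return _mat(arr[lo])
--     mid = (lo + hi) // 2
--     return _mul(_prod(arr, mid, hi), _prod(arr, lo, mid))
--
-- def solve(n, arr):
--     r0 = arr[0]
--     base = [max(r0[1], r0[2]), max(r0[0], r0[2]), max(r0[0], r0[1]),
--             max(max(r0[0], r0[1]), r0[2]), 0]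
--     if n == 1:
--         return base[3]
--     m = _prod(arr, 1, n)
--     ans = None
--     for k in range(5):
--         x = m[3][k]
--         if x is not None:
--             s = x + base[k]
--             if ans is None or s > ans:
--                 ans = s
--     return ans
-- ===== Notes on version B (the rewrite author's own statement) =====
-- stated objective: alternative
-- what changed: Reformulates the DP as max-plus (tropical) linear algebra: each day becomes a 5-state transition matrix (last task 0/1/2, an 'any' row, and a 0-floor state), the day matrices are combined by divide-and-conquer associative max-plus matrix products, and the answer reads row 3 of the product applied to the day-0 vector.
import Mathlib
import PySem

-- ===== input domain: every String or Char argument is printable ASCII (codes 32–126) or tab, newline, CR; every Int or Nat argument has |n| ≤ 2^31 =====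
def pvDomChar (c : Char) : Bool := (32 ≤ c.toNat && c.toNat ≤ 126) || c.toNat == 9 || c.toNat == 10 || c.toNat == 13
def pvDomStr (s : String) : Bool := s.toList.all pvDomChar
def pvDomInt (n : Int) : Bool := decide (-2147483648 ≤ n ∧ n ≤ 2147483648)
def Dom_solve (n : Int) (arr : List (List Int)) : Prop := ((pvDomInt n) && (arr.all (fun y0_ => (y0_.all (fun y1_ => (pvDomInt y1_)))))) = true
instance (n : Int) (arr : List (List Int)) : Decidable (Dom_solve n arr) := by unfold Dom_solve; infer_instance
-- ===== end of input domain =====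

-- B reformulates the DP as max-plus (tropical) linear algebra: each day is a 5-state
-- transition matrix, combined by divide-and-conquer matrix products (objective: alternative).

-- ===== PORT A =====
-- arr[day][task] / dp rows, exact Python indexing (inside Pre_ every index is in range)
def gI (l : List Int) (i : Int) : Int := PySem.List.pyGetD l i 0
def gR (l : List (List Int)) (i : Int) : List Int := PySem.List.pyGetD l i []

-- the body of A's 'for last in range(4)' / 'for task in range(3)' loops for one day
def stepRowA (arr : List (List Int)) (day : Int) (prev : List Int) : List Int :=
  (List.range 4).map (fun last =>
    (List.range 3).foldl (fun best task =>
      if (task : Int) ≠ (last : Int) then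
        max best (gI (gR arr day) task + gI prev task)
      else best) 0)

def solve (n : Int) (arr : List (List Int)) : Int :=
  let a0 := gR arr 0
  let dp0 : List Int :=
    [max (gI a0 1) (gI a0 2), max (gI a0 0) (gI a0 2),
     max (gI a0 0) (gI a0 1), max (gI a0 1) (max (gI a0 0) (gI a0 2))]
  let dp := (PySem.List.pyRange 1 n 1).foldl
      (fun dp day => dp ++ [stepRowA arr day (gR dp (day - 1))]) [dp0]
  gI (gR dp (n - 1)) 3

-- ===== PORT B =====
-- B's matrices are 5×5 lists over Option Int (None = -infinity); python indexes them
-- only with i, j, k in range(5), all nonnegative and in range, so List.getD is exact.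
def gO (l : List (Option Int)) (k : Nat) : Option Int := l.getD k none
def gOR (m : List (List (Option Int))) (i : Nat) : List (Option Int) := m.getD i []

-- the inner-loop body of Source B's _mul / final loop: best = max-plus accumulate of x + y
def bstep (best x y : Option Int) : Option Int :=
  match x, y with
  | some a, some b =>
      let s := a + b
      match best with
      | none => some s
      | some m => if s > m then some s else some m
  | _, _ => best

def mulP (p q : List (List (Option Int))) : List (List (Option Int)) :=
  (List.range 5).map (fun i => (List.range 5).map (fun j =>
    (List.range 5).foldl (fun best k => bstep best (gO (gOR p i) k) (gO (gOR q k) j)) none))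

def matE (r : List Int) : List (List (Option Int)) :=
  [[none, some (gI r 1), some (gI r 2), none, some 0],
   [some (gI r 0), none, some (gI r 2), none, some 0],
   [some (gI r 0), some (gI r 1), none, none, some 0],
   [some (gI r 0), some (gI r 1), some (gI r 2), none, some 0],
   [none, none, none, none, some 0]]

-- Source B tests 'hi - lo == 1'; the '≤ 1' here only adds totality on inputs where the
-- Python recursion never terminates (hi - lo ≤ 0), which no call inside Pre_ reaches.
def prodP (arr : List (List Int)) (lo hi : Int) : List (List (Option Int)) :=
  if hi - lo ≤ 1 then matE (gR arr lo)
  else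
    mulP (prodP arr (PySem.Int.floordiv (lo + hi) 2) hi)
         (prodP arr lo (PySem.Int.floordiv (lo + hi) 2))
termination_by (hi - lo).toNat
decreasing_by
  · have h2 : lo + 1 ≤ PySem.Int.floordiv (lo + hi) 2 := by
      rw [PySem.Int.le_floordiv_iff_mul_le (by omega)]; omega
    omega
  · have h3 := PySem.Int.floordiv_lt_iff_lt_mul (a := lo + hi) (b := 2) (q := hi) (by omega)
    omega

def solve_alt (n : Int) (arr : List (List Int)) : Int :=
  let r0 := gR arr 0
  let base : List Int :=
    [max (gI r0 1) (gI r0 2), max (gI r0 0) (gI r0 2), max (gI r0 0) (gI r0 1),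
     max (max (gI r0 0) (gI r0 1)) (gI r0 2), 0]
  if n = 1 then gI base 3
  else
    let m := prodP arr 1 n
    let ans := (List.range 5).foldl
      (fun ans k => bstep ans (gO (gOR m 3) k) (some (gI base k))) none
    -- python returns ans (an int: slot k = 4 is always set); none is unreachable inside Pre_
    ans.getD 0

-- ===== PRECONDITION & SPEC =====
-- Exactly the inputs on which Python A returns: n ≥ 1 (n = 0 indexes dp[0] of an empty
-- table, IndexError), n ≤ len(arr) and every used row has at least 3 entries (IndexError).
def Pre_solve (n : Int) (arr : List (List Int)) : Prop :=
  1 ≤ n ∧ n ≤ (arr.length : Int) ∧ ∀ row ∈ arr.take n.toNat, 3 ≤ row.length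
instance (n : Int) (arr : List (List Int)) : Decidable (Pre_solve n arr) := by
  unfold Pre_solve; infer_instance
def pvWitness_solve : Int × List (List Int) := (2, [[1, 2, 3], [4, 5, 6]])

def Spec_solve (n : Int) (arr : List (List Int)) (out : Int) : Prop := out = solve_alt n arr
instance (n : Int) (arr : List (List Int)) (out : Int) : Decidable (Spec_solve n arr out) := by
  unfold Spec_solve; infer_instance

-- ===== CLAIM (what is proved, stated in full; the proofs are below) =====
def Claim_equal_solve : Prop := ∀ (n : Int) (arr : List (List Int)),
  Dom_solve n arr → Pre_solve n arr → Spec_solve n arr (solve n arr)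

-- ===== LEMMAS AND PROOFS =====

-- ---- A side: the dp table as a recurrence (as in the tabulation proof) ----
def rowOf (arr : List (List Int)) : Nat → List Int
  | 0 =>
    [max (gI (gR arr 0) 1) (gI (gR arr 0) 2), max (gI (gR arr 0) 0) (gI (gR arr 0) 2),
     max (gI (gR arr 0) 0) (gI (gR arr 0) 1),
     max (gI (gR arr 0) 1) (max (gI (gR arr 0) 0) (gI (gR arr 0) 2))]
  | d + 1 => stepRowA arr ((d : Int) + 1) (rowOf arr d)

lemma gI_0 (a b c d : Int) : gI [a, b, c, d] 0 = a := rfl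
lemma gI_1 (a b c d : Int) : gI [a, b, c, d] 1 = b := rfl
lemma gI_2 (a b c d : Int) : gI [a, b, c, d] 2 = c := rfl
lemma gI_3 (a b c d : Int) : gI [a, b, c, d] 3 = d := rfl

lemma stepRowA_eq (arr : List (List Int)) (day : Int) (prev : List Int) :
    stepRowA arr day prev =
      [max (max 0 (gI (gR arr day) 1 + gI prev 1)) (gI (gR arr day) 2 + gI prev 2),
       max (max 0 (gI (gR arr day) 0 + gI prev 0)) (gI (gR arr day) 2 + gI prev 2),
       max (max 0 (gI (gR arr day) 0 + gI prev 0)) (gI (gR arr day) 1 + gI prev 1),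
       max (max (max 0 (gI (gR arr day) 0 + gI prev 0)) (gI (gR arr day) 1 + gI prev 1))
         (gI (gR arr day) 2 + gI prev 2)] := by
  norm_num [stepRowA, List.range_succ]

lemma loopA_eq (arr : List (List Int)) (dp0 : List Int) (h0 : dp0 = rowOf arr 0) (k : Nat) :
    (PySem.List.pyRange 1 (1 + (k : Int)) 1).foldl
        (fun dp day => dp ++ [stepRowA arr day (gR dp (day - 1))]) [dp0]
      = (List.range (k + 1)).map (rowOf arr) := by
  induction k with
  | zero =>
      rw [show ((1 : Int) + ((0 : Nat) : Int)) = 1 by norm_num,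
        PySem.List.pyRange_one_eq_nil (by omega)]
      simp [h0]
  | succ k ih =>
      rw [show ((1 : Int) + (((k + 1 : Nat)) : Int)) = (1 + (k : Int)) + 1 by push_cast; ring,
        PySem.List.pyRange_one_succ_right (by omega), List.foldl_append, ih]
      simp only [List.foldl_cons, List.foldl_nil]
      have hget : gR ((List.range (k + 1)).map (rowOf arr)) ((1 + (k : Int)) - 1)
          = rowOf arr k := by
        rw [show ((1 + (k : Int)) - 1) = ((k : Nat) : Int) by ring]
        rw [show gR ((List.range (k + 1)).map (rowOf arr)) ((k : Nat) : Int)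
              = PySem.List.pyGetD ((List.range (k + 1)).map (rowOf arr)) ((k : Nat) : Int) []
            from rfl]
        rw [PySem.List.pyGetD_natCast]
        exact PySem.List.getD_map_range _ _ _ _ (by omega)
      have hstep : stepRowA arr (1 + (k : Int)) (rowOf arr k) = rowOf arr (k + 1) := by
        rw [show (1 + (k : Int)) = (k : Int) + 1 by ring]
        rfl
      rw [hget, hstep, List.range_succ (n := k + 1), List.map_append,
        List.map_cons, List.map_nil]

-- A's answer is the (n-1)-th dp row's last entry
lemma solveA_eq_rowOf (n : Int) (arr : List (List Int)) (hn : 1 ≤ n) :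
    solve n arr = gI (rowOf arr (n - 1).toNat) 3 := by
  unfold solve
  have hk : n = 1 + (((n - 1).toNat : Nat) : Int) := by omega
  rw [hk]
  dsimp only
  have h0 : ([max (gI (gR arr 0) 1) (gI (gR arr 0) 2), max (gI (gR arr 0) 0) (gI (gR arr 0) 2),
      max (gI (gR arr 0) 0) (gI (gR arr 0) 1),
      max (gI (gR arr 0) 1) (max (gI (gR arr 0) 0) (gI (gR arr 0) 2))])
      = rowOf arr 0 := rfl
  rw [loopA_eq arr _ h0]
  rw [show (1 + (((n - 1).toNat : Nat) : Int)) - 1 = (((n - 1).toNat : Nat) : Int) by ring]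
  rw [show gR ((List.range ((n - 1).toNat + 1)).map (rowOf arr)) (((n - 1).toNat : Nat) : Int)
        = PySem.List.pyGetD ((List.range ((n - 1).toNat + 1)).map (rowOf arr))
            (((n - 1).toNat : Nat) : Int) []
      from rfl]
  rw [PySem.List.pyGetD_natCast, PySem.List.getD_map_range _ _ _ _ (by omega)]
  simp

-- ---- B side: tropical (max-plus) algebra on Option Int ----
def tmul : Option Int → Option Int → Option Int
  | some a, some b => some (a + b)
  | _, _ => none
def tadd : Option Int → Option Int → Option Int
  | none, b => b
  | some a, none => some a
  | some a, some b => some (max a b)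
def dotL : List (Option Int) → List (Option Int) → Option Int
  | a :: as, b :: bs => tadd (tmul a b) (dotL as bs)
  | _, _ => none
def mvL (q : List (List (Option Int))) (w : List (Option Int)) : List (Option Int) :=
  q.map (fun r => dotL r w)

lemma bstep_eq (best x y : Option Int) : bstep best x y = tadd best (tmul x y) := by
  cases best <;> cases x <;> cases y <;>
    simp only [bstep, tmul, tadd] <;> first
  | rfl
  | (split_ifs with h <;> simp <;> omega)

lemma tadd_none_left (a : Option Int) : tadd none a = a := rfl
lemma tadd_none_right (a : Option Int) : tadd a none = a := by cases a <;> rfl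
lemma dotL_nil (w : List (Option Int)) : dotL [] w = none := by cases w <;> rfl
lemma dotL_nil' (u : List (Option Int)) : dotL u [] = none := by cases u <;> rfl
lemma tadd_assoc (a b c : Option Int) : tadd (tadd a b) c = tadd a (tadd b c) := by
  cases a <;> cases b <;> cases c <;> simp [tadd] <;> omega
lemma tadd_comm (a b : Option Int) : tadd a b = tadd b a := by
  cases a <;> cases b <;> simp [tadd] <;> omega
lemma tmul_assoc (a b c : Option Int) : tmul (tmul a b) c = tmul a (tmul b c) := by
  cases a <;> cases b <;> cases c <;> simp [tmul] <;> omega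
lemma tmul_tadd (a b c : Option Int) : tmul a (tadd b c) = tadd (tmul a b) (tmul a c) := by
  cases a <;> cases b <;> cases c <;> simp [tmul, tadd] <;> omega
lemma tadd_tmul (a b c : Option Int) : tmul (tadd a b) c = tadd (tmul a c) (tmul b c) := by
  cases a <;> cases b <;> cases c <;> simp [tmul, tadd] <;> omega

lemma len5 {α : Type} (l : List α) (h : l.length = 5) :
    ∃ a b c d e : α, l = [a, b, c, d, e] := by
  match l, h with
  | [a, b, c, d, e], _ => exact ⟨a, b, c, d, e, rfl⟩

-- S1: scalar pulls out of a dot product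
lemma tmul_dotL (a : Option Int) (u w : List (Option Int)) :
    tmul a (dotL u w) = dotL (u.map (tmul a)) w := by
  induction u generalizing w with
  | nil =>
      rw [dotL_nil, List.map_nil, dotL_nil]
      cases a <;> rfl
  | cons x u ih =>
      cases w with
      | nil =>
          rw [dotL_nil', List.map_cons, dotL_nil']
          cases a <;> rfl
      | cons y w => simp [dotL, tmul_tadd, tmul_assoc, ih]

-- S2: dot distributes over pointwise tadd
lemma dotL_zipWith_tadd (u v w : List (Option Int)) (h : u.length = v.length) :
    dotL (List.zipWith tadd u v) w = tadd (dotL u w) (dotL v w) := by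
  induction u generalizing v w with
  | nil =>
      cases v with
      | nil => cases w <;> rfl
      | cons y v => simp at h
  | cons x u ih =>
      cases v with
      | nil => simp at h
      | cons y v =>
          cases w with
          | nil => rfl
          | cons z w =>
              simp only [List.zipWith_cons_cons, dotL, tadd_tmul, ih v w (by simpa using h)]
              rw [tadd_assoc, tadd_assoc]
              congr 1
              rw [← tadd_assoc, ← tadd_assoc, tadd_comm (tmul y z)]

-- Source B's k-loop against the j-th column of a 5×5 matrix
lemma foldl_bstep_eq_dotL_col (u : List (Option Int)) (q : List (List (Option Int)))
    (j : Nat) (hu : u.length = 5) (hq5 : q.length = 5) :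
    (List.range 5).foldl (fun best k => bstep best (gO u k) (gO (gOR q k) j)) none
      = dotL u (q.map (fun r => r.getD j none)) := by
  obtain ⟨a0, a1, a2, a3, a4, rfl⟩ := len5 u hu
  obtain ⟨r0, r1, r2, r3, r4, rfl⟩ := len5 q hq5
  simp [List.range_succ, bstep_eq, gO, gOR, dotL, tadd_none_left, tadd_none_right, tadd_assoc]

-- key interchange: pr · (q ⊗ w) = (pr ⊗ q) · w for 5-wide matrices
lemma dot_mv (pr : List (Option Int)) (q : List (List (Option Int))) (w : List (Option Int))
    (hq : ∀ r ∈ q, r.length = 5) (hw : w.length = 5) (hpq : pr.length = q.length) :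
    dotL pr (mvL q w) =
      dotL ((List.range 5).map (fun j => dotL pr (q.map (fun r => r.getD j none)))) w := by
  induction pr generalizing q with
  | nil =>
      cases q with
      | nil =>
          obtain ⟨w0, w1, w2, w3, w4, rfl⟩ := len5 w hw
          simp [List.range_succ, dotL, tmul, tadd]
      | cons r q => simp at hpq
  | cons a pr ih =>
      cases q with
      | nil => simp at hpq
      | cons r q =>
          have hr : r.length = 5 := hq r (by simp)
          have hq' : ∀ r' ∈ q, r'.length = 5 := fun r' h => hq r' (by simp [h])
          have hlen : pr.length = q.length := by simpa using hpq
          rw [show mvL (r :: q) w = dotL r w :: mvL q w from rfl,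
            show dotL (a :: pr) (dotL r w :: mvL q w)
              = tadd (tmul a (dotL r w)) (dotL pr (mvL q w)) from rfl,
            tmul_dotL, ih q hq' hlen,
            ← dotL_zipWith_tadd _ _ _ (by simp [hr])]
          congr 1
          apply List.ext_getElem
          · simp [hr]
          · intro j h1 h2
            have hj5 : j < 5 := by simpa using h2
            have hjr : j < r.length := by omega
            simp only [List.getElem_zipWith, List.getElem_map, List.getElem_range,
              List.map_cons]
            rw [show dotL (a :: pr) (r.getD j none :: q.map (fun r' => r'.getD j none))
                = tadd (tmul a (r.getD j none)) (dotL pr (q.map (fun r' => r'.getD j none)))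
              from rfl]
            rw [List.getD_eq_getElem r none hjr]

lemma mulP_shape (p q : List (List (Option Int))) :
    (mulP p q).length = 5 ∧ ∀ r ∈ mulP p q, r.length = 5 := by
  constructor
  · simp [mulP]
  · intro r hr
    simp only [mulP, List.mem_map] at hr
    obtain ⟨i, _, rfl⟩ := hr
    simp

lemma prodP_shape (arr : List (List Int)) (lo hi : Int) :
    (prodP arr lo hi).length = 5 ∧ ∀ r ∈ prodP arr lo hi, r.length = 5 := by
  rw [prodP]
  split
  · constructor
    · rfl
    · intro r hr
      simp only [matE, List.mem_cons, List.not_mem_nil, or_false] at hr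
      rcases hr with rfl | rfl | rfl | rfl | rfl <;> rfl
  · exact mulP_shape _ _

-- the product matrix acts on vectors as the composition of its factors' actions
lemma mvL_mulP (p q : List (List (Option Int))) (w : List (Option Int))
    (hp5 : p.length = 5) (hpr : ∀ r ∈ p, r.length = 5)
    (hq5 : q.length = 5) (hqr : ∀ r ∈ q, r.length = 5) (hw : w.length = 5) :
    mvL (mulP p q) w = mvL p (mvL q w) := by
  apply List.ext_getElem
  · simp [mulP, mvL, hp5]
  · intro i h1 h2
    have hi5 : i < 5 := by simpa [mulP, mvL] using h1
    have hip : i < p.length := by omega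
    simp only [mvL, mulP, List.map_map, List.getElem_map, List.getElem_range,
      Function.comp]
    have hgOR : gOR p i = p[i] := by
      unfold gOR; exact List.getD_eq_getElem p [] hip
    rw [hgOR]
    rw [List.map_congr_left (fun j _ =>
      foldl_bstep_eq_dotL_col p[i] q j (hpr _ (List.getElem_mem hip)) hq5)]
    rw [← dot_mv p[i] q w hqr hw (by simp [hpr _ (List.getElem_mem hip), hq5])]
    rfl

-- sequential day-stepping (the fold the product replaces), lo = first day applied
def sA (arr : List (List Int)) : Int → Nat → List (Option Int) → List (Option Int)
  | _, 0, w => w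
  | lo, k + 1, w => sA arr (lo + 1) k (mvL (matE (gR arr lo)) w)

lemma sA_add (arr : List (List Int)) (k1 k2 : Nat) :
    ∀ (lo : Int) (w : List (Option Int)),
      sA arr lo (k1 + k2) w = sA arr (lo + (k1 : Int)) k2 (sA arr lo k1 w) := by
  induction k1 with
  | zero => intro lo w; simp [sA]
  | succ k1 ih =>
      intro lo w
      rw [show k1 + 1 + k2 = (k1 + k2) + 1 by omega]
      show sA arr (lo + 1) (k1 + k2) (mvL (matE (gR arr lo)) w) = _
      rw [ih]
      rw [show lo + 1 + (k1 : Int) = lo + ((k1 + 1 : Nat) : Int) by push_cast; ring]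
      rfl

lemma sA_len (arr : List (List Int)) (k : Nat) :
    ∀ (lo : Int) (w : List (Option Int)), 1 ≤ k → (sA arr lo k w).length = 5 := by
  induction k with
  | zero => intro _ _ h; omega
  | succ k ih =>
      intro lo w _
      cases k with
      | zero => simp [sA, mvL, matE]
      | succ k => exact ih (lo + 1) _ (by omega)

lemma prodP_action (arr : List (List Int)) :
    ∀ (k : Nat), 1 ≤ k → ∀ (lo : Int) (w : List (Option Int)), w.length = 5 →
      mvL (prodP arr lo (lo + (k : Int))) w = sA arr lo k w := by
  intro k
  induction k using Nat.strong_induction_on with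
  | _ k IH =>
    intro hk lo w hw
    rw [prodP]
    by_cases hbase : lo + (k : Int) - lo ≤ 1
    · rw [if_pos hbase]
      have hk1 : k = 1 := by omega
      subst hk1
      rfl
    · rw [if_neg hbase]
      have hk2 : 2 ≤ k := by omega
      have hmid1 : lo + 1 ≤ PySem.Int.floordiv (lo + (lo + (k : Int))) 2 := by
        rw [PySem.Int.le_floordiv_iff_mul_le (by omega)]; omega
      have hmid2 := PySem.Int.floordiv_lt_iff_lt_mul
        (a := lo + (lo + (k : Int))) (b := 2) (q := lo + (k : Int)) (by omega)
      set mid := PySem.Int.floordiv (lo + (lo + (k : Int))) 2 with hmid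
      have hmid3 : mid < lo + (k : Int) := by omega
      set k1 := (mid - lo).toNat with hk1
      have hk1i : (k1 : Int) = mid - lo := by omega
      set k2 := k - k1 with hk2d
      have hk2i : (k2 : Int) = lo + (k : Int) - mid := by omega
      have hQsh := prodP_shape arr lo mid
      have hPsh := prodP_shape arr mid (lo + (k : Int))
      rw [mvL_mulP _ _ _ hPsh.1 hPsh.2 hQsh.1 hQsh.2 hw]
      have hQ : mvL (prodP arr lo mid) w = sA arr lo k1 w := by
        have := IH k1 (by omega) (by omega) lo w hw
        rw [show lo + (k1 : Int) = mid by omega] at this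
        exact this
      rw [hQ]
      have hlen1 : (sA arr lo k1 w).length = 5 := sA_len arr k1 lo w (by omega)
      have hP : mvL (prodP arr mid (lo + (k : Int))) (sA arr lo k1 w)
          = sA arr mid k2 (sA arr lo k1 w) := by
        have := IH k2 (by omega) (by omega) mid (sA arr lo k1 w) hlen1
        rw [show mid + (k2 : Int) = lo + (k : Int) by omega] at this
        exact this
      rw [hP, show k2 = k - k1 from rfl, show mid = lo + (k1 : Int) by omega, ← sA_add]
      congr 1
      omega

-- ---- connecting to A's dp rows ----
def wOf (arr : List (List Int)) (d : Nat) : List (Option Int) :=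
  [some (gI (rowOf arr d) 0), some (gI (rowOf arr d) 1), some (gI (rowOf arr d) 2),
   some (gI (rowOf arr d) 3), some 0]

lemma mvL_matE (r : List Int) (v0 v1 v2 v3 : Int) :
    mvL (matE r) [some v0, some v1, some v2, some v3, some 0]
      = [some (max (max 0 (gI r 1 + v1)) (gI r 2 + v2)),
         some (max (max 0 (gI r 0 + v0)) (gI r 2 + v2)),
         some (max (max 0 (gI r 0 + v0)) (gI r 1 + v1)),
         some (max (max (max 0 (gI r 0 + v0)) (gI r 1 + v1)) (gI r 2 + v2)),
         some 0] := by
  simp [mvL, matE, dotL, tadd, tmul]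
  refine ⟨by omega, by omega, by omega, by omega⟩

lemma step_wOf (arr : List (List Int)) (d : Nat) :
    mvL (matE (gR arr ((d : Int) + 1))) (wOf arr d) = wOf arr (d + 1) := by
  have hrow : rowOf arr (d + 1) = stepRowA arr ((d : Int) + 1) (rowOf arr d) := rfl
  rw [wOf, mvL_matE, wOf, hrow, stepRowA_eq, gI_0, gI_1, gI_2, gI_3]

lemma sA_wOf (arr : List (List Int)) (k : Nat) :
    ∀ (d : Nat), sA arr ((d : Int) + 1) k (wOf arr d) = wOf arr (d + k) := by
  induction k with
  | zero => intro d; rfl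
  | succ k ih =>
      intro d
      show sA arr ((d : Int) + 1 + 1) k (mvL (matE (gR arr ((d : Int) + 1))) (wOf arr d)) = _
      rw [step_wOf, show ((d : Int) + 1 + 1) = (((d + 1 : Nat) : Int) + 1) by push_cast; ring,
        ih (d + 1), show d + 1 + k = d + (k + 1) by omega]

lemma gI5_0 (a b c d e : Int) : gI [a, b, c, d, e] 0 = a := rfl
lemma gI5_1 (a b c d e : Int) : gI [a, b, c, d, e] 1 = b := rfl
lemma gI5_2 (a b c d e : Int) : gI [a, b, c, d, e] 2 = c := rfl
lemma gI5_3 (a b c d e : Int) : gI [a, b, c, d, e] 3 = d := rfl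
lemma gI5_4 (a b c d e : Int) : gI [a, b, c, d, e] 4 = e := rfl

-- Source B's final k-loop (row 3 of the product against the day-0 vector)
lemma foldl_bstep_eq_dotL_base (u : List (Option Int)) (b : List Int)
    (hu : u.length = 5) (hb : b.length = 5) :
    (List.range 5).foldl (fun best k => bstep best (gO u k) (some (gI b k))) none
      = dotL u (b.map (fun x => some x)) := by
  obtain ⟨a0, a1, a2, a3, a4, rfl⟩ := len5 u hu
  obtain ⟨b0, b1, b2, b3, b4, rfl⟩ := len5 b hb
  simp [List.range_succ, bstep_eq, gO, gI5_0, gI5_1, gI5_2, gI5_3, gI5_4, dotL,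
    tadd_none_left, tadd_none_right, tadd_assoc]

-- B's answer is also the (n-1)-th dp row's last entry
lemma solveB_eq_rowOf (n : Int) (arr : List (List Int)) (hn : 1 ≤ n) :
    solve_alt n arr = gI (rowOf arr (n - 1).toNat) 3 := by
  unfold solve_alt
  dsimp only
  by_cases h1 : n = 1
  · subst h1
    rw [if_pos rfl]
    rw [show ((1 : Int) - 1).toNat = 0 by norm_num]
    rw [show rowOf arr 0 =
      [max (gI (gR arr 0) 1) (gI (gR arr 0) 2), max (gI (gR arr 0) 0) (gI (gR arr 0) 2),
       max (gI (gR arr 0) 0) (gI (gR arr 0) 1),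
       max (gI (gR arr 0) 1) (max (gI (gR arr 0) 0) (gI (gR arr 0) 2))] from rfl]
    rw [gI5_3, gI_3]
    omega
  · rw [if_neg h1]
    have hn2 : 2 ≤ n := by
      rcases lt_or_eq_of_le hn with h | h
      · omega
      · exact absurd h.symm h1
    set k := (n - 1).toNat with hkdef
    have hk1 : 1 ≤ k := by omega
    have hsh := prodP_shape arr 1 n
    have h35 : (3 : Nat) < (prodP arr 1 n).length := by omega
    have hgor : gOR (prodP arr 1 n) 3 = (prodP arr 1 n)[3] := by
      unfold gOR; exact List.getD_eq_getElem _ [] h35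
    have hu5 : (gOR (prodP arr 1 n) 3).length = 5 := by
      rw [hgor]; exact hsh.2 _ (List.getElem_mem h35)
    rw [foldl_bstep_eq_dotL_base _ _ hu5 rfl]
    simp only [List.map_cons, List.map_nil]
    rw [show max (max (gI (gR arr 0) 0) (gI (gR arr 0) 1)) (gI (gR arr 0) 2)
        = max (gI (gR arr 0) 1) (max (gI (gR arr 0) 0) (gI (gR arr 0) 2)) by omega]
    rw [show [some (max (gI (gR arr 0) 1) (gI (gR arr 0) 2)),
        some (max (gI (gR arr 0) 0) (gI (gR arr 0) 2)),
        some (max (gI (gR arr 0) 0) (gI (gR arr 0) 1)),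
        some (max (gI (gR arr 0) 1) (max (gI (gR arr 0) 0) (gI (gR arr 0) 2))),
        some (0 : Int)] = wOf arr 0 from rfl]
    have hdot : dotL (gOR (prodP arr 1 n) 3) (wOf arr 0)
        = gO (mvL (prodP arr 1 n) (wOf arr 0)) 3 := by
      rw [hgor]
      unfold mvL gO
      rw [List.getD_eq_getElem _ none (by simp [hsh.1] : 3 < ((prodP arr 1 n).map
        (fun r => dotL r (wOf arr 0))).length), List.getElem_map]
    rw [hdot]
    have haction : mvL (prodP arr 1 n) (wOf arr 0) = wOf arr k := by
      rw [show n = 1 + (k : Int) by omega,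
        prodP_action arr k hk1 1 (wOf arr 0) rfl]
      have h := sA_wOf arr k 0
      simpa using h
    rw [haction]
    rfl

-- ===== VERDICT (by name: the statement is the Claim_ definition above) =====
theorem solve_spec : Claim_equal_solve := by
  intro n arr _ hpre
  obtain ⟨hn, -, -⟩ := hpre
  unfold Spec_solve
  rw [solveA_eq_rowOf n arr hn, solveB_eq_rowOf n arr hn]
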